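-- pv_equiv track=rewrite | github.com/Algorithm-bbackgongdan/Almut-2nd | code/kauthenticity/week4/prog_92342.py | solution
-- ===== SOURCE A (Python) =====
-- INFO_LAST_INDEX = 10
--
-- def calcScore(apeachInfo, ryanInfo):
--     apeachScore = 0
--     ryanScore = 0
--
--     for i in range(0, 11):
--         # 둘 다 몾 맞추면 점수를 얻지 못함
--         if apeachInfo[i] == ryanInfo[i] == 0:
--             continue
--
--         if apeachInfo[i] >= ryanInfo[i]:
--             apeachScore += 10 - i
--         else:
--             ryanScore += 10 - i
--
--     return apeachScore, ryanScore
--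
-- def isBetter(prevInfo, curInfo):
--     for i in range(10, -1, -1):
--         # 기존 정답보다 낮은 점수의 개수가 더 많음
--         if prevInfo[i] < curInfo[i]:
--             return True
--         # 기존 정답보다 낮은 점수의 개수가 더 적으면, 조건 위배
--         elif prevInfo[i] > curInfo[i]:
--             return False
--
--     # 비기는 경우는 이길 수 없음
--     return False
--
-- def solution(n, info):
--     answer = [-1]
--     stack = []
--     arrows = n
--     index = 0
--     ryanInfo = [0] * 11
--     maxDiff = 0
--
--     if arrows > info[index]:
--         ryanShoot = info[index] + 1
--         newInfo = ryanInfo[:]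
--         newInfo[index] = ryanShoot
--         stack.append((index + 1, arrows - ryanShoot, newInfo))
--
--     stack.append((index + 1, arrows, ryanInfo[:]))
--
--     while stack:
--         # 현재 쏠 과녁 index, 남은 화살 개수, 라이언 점수표
--         index, arrows, ryanInfo = stack.pop()
--
--         # 10점 -> 0점 다 돎
--         if index > INFO_LAST_INDEX:
--             # 주어진 화살을 다 쏘지 않은 경우
--             if arrows > 0:
--                 ryanInfo[INFO_LAST_INDEX] = arrows
--
--             apeachScore, ryanScore = calcScore(apeachInfo=info, ryanInfo=ryanInfo)
--             curDiff = ryanScore - apeachScore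
--
--             if curDiff > maxDiff:
--                 answer = ryanInfo[:]
--                 maxDiff = curDiff
--
--             # 점수 차이가 같은 경우에는 낮은 점수를 많이 맞힌 경우가 정답
--             elif (
--                 curDiff > 0
--                 and curDiff == maxDiff
--                 and isBetter(prevInfo=answer, curInfo=ryanInfo)
--             ):
--                 answer = ryanInfo[:]
--                 maxDiff = curDiff
--
--             continue
--
--         # 점수를 얻는 경우
--         if arrows > info[index]:
--             ryanShoot = info[index] + 1
--             ryanInfo[index] = ryanShoot
--             stack.append((index + 1, arrows - ryanShoot, ryanInfo[:]))
--
--         # 점수를 얻지 않는 경우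
--         ryanInfo[index] = 0
--         stack.append((index + 1, arrows, ryanInfo[:]))
--
--     return answer
-- ===== SOURCE B (Python) =====
-- # Recursive DFS with a threaded (answer, maxDiff) accumulator instead of A's explicit
-- # stack + while loop; the per-target branching (concede first, then win) and the
-- # tie-break (bigger diff, then lexicographically-more low-score hits) are the same.
-- def solution(n, info):
--     def score_diff(ryan):
--         return sum(
--             (10 - i) if ryan[i] > info[i] else (-(10 - i) if (info[i] or ryan[i]) else 0)
--             for i in range(11)
--         )
--
--     def dfs(index, arrows, ryan, best):
--         if index > 10:
--             if arrows > 0: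
--                 ryan = ryan[:10] + [arrows]
--             diff = score_diff(ryan)
--             answer, maxDiff = best
--             if diff > maxDiff or (0 < diff == maxDiff and ryan[::-1] > answer[::-1]):
--                 return (ryan, diff)
--             return best
--         best = dfs(index + 1, arrows, ryan + [0], best)
--         if arrows > info[index]:
--             shoot = info[index] + 1
--             best = dfs(index + 1, arrows - shoot, ryan + [shoot], best)
--         return best
--
--     return dfs(0, n, [], ([-1], 0))[0]
-- ===== Notes on version B (the rewrite author's own statement) =====
-- stated objective: alternative
-- what changed: Replaces A's explicit stack + while loop with mutable best-state and copy-then-mutate score sheets by a recursive DFS that threads the (answer, maxDiff) accumulator, builds the score sheet immutably by appending per-target choices, computes the score gap in a single comprehension instead of A's two-accumulator loop, and does the tie-break via reversed-list lexicographic comparison instead of A's index loop.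
import Mathlib
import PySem

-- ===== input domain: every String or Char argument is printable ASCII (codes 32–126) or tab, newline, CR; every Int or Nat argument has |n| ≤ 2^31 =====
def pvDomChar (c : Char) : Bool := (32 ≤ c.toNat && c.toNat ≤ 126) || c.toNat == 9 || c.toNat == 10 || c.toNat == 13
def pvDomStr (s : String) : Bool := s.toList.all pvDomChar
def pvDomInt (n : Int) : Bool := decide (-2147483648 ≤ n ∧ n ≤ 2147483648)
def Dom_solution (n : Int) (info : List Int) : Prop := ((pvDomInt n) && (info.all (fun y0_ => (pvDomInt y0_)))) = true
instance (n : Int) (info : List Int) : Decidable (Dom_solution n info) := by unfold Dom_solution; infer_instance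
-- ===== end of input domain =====

-- B replaces A's explicit stack/while-loop search by a recursive DFS threading the
-- (answer, maxDiff) accumulator (objective: alternative; same cost).


-- ===== PORT A =====
-- xs[i] / xs[i] = v: under Pre_solution every index used (0..10) is in range, so the
-- total forms pyGetD / pySetD are exact here.
def INFO_LAST_INDEX : Int := 10

def calcScore (apeachInfo ryanInfo : List Int) : Int × Int :=
  (PySem.List.pyRange 0 11 1).foldl (fun acc i =>
    if PySem.List.pyGetD apeachInfo i 0 = PySem.List.pyGetD ryanInfo i 0 ∧
        PySem.List.pyGetD ryanInfo i 0 = 0 then acc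
    else if PySem.List.pyGetD apeachInfo i 0 ≥ PySem.List.pyGetD ryanInfo i 0 then
      (acc.1 + (10 - i), acc.2)
    else (acc.1, acc.2 + (10 - i))) (0, 0)

-- the early-returning 'for i in range(10, -1, -1)' loop of isBetter
def isBetterGo (prevInfo curInfo : List Int) : List Int → Bool
  | [] => false
  | i :: rest =>
    if PySem.List.pyGetD prevInfo i 0 < PySem.List.pyGetD curInfo i 0 then true
    else if PySem.List.pyGetD prevInfo i 0 > PySem.List.pyGetD curInfo i 0 then false
    else isBetterGo prevInfo curInfo rest

def isBetter (prevInfo curInfo : List Int) : Bool :=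
  isBetterGo prevInfo curInfo (PySem.List.pyRange 10 (-1) (-1))

-- termination measure for the while loop: stack frames with smaller index dominate
def loopMeasure (f : Int × Int × List Int) : Nat :=
  if 11 ≤ f.1 then 1 else 3 ^ (11 - f.1).toNat

theorem loopMeasure_pos (f : Int × Int × List Int) : 1 ≤ loopMeasure f := by
  unfold loopMeasure; split
  · omega
  · exact Nat.one_le_pow _ _ (by omega)

theorem loopMeasure_children (i : Int) (h : ¬ i > 10) (a b c : Int)
    (x y z : List Int) :
    loopMeasure (i + 1, a, x) + loopMeasure (i + 1, b, y) < loopMeasure (i, c, z) := by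
  unfold loopMeasure
  by_cases h10 : i = 10
  · subst h10; norm_num
  · have h1 : ¬ 11 ≤ i + 1 := by omega
    have h2 : ¬ 11 ≤ i := by omega
    simp only [if_neg h1, if_neg h2]
    have hk : (11 - i).toNat = (11 - (i + 1)).toNat + 1 := by omega
    have hp : 1 ≤ 3 ^ (11 - (i + 1)).toNat := Nat.one_le_pow _ _ (by omega)
    rw [hk, pow_succ]
    omega

-- the 'while stack:' loop (stack top = list head; Python append/pop are LIFO)
def solutionLoop (info : List Int) (stack : List (Int × Int × List Int))
    (answer : List Int) (maxDiff : Int) : List Int × Int :=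
  match stack with
  | [] => (answer, maxDiff)
  | (index, arrows, ryanInfo) :: rest =>
    if h : index > INFO_LAST_INDEX then
      let ryanInfo' := if arrows > 0 then PySem.List.pySetD ryanInfo 10 arrows else ryanInfo
      let s := calcScore info ryanInfo'
      let curDiff := s.2 - s.1
      if curDiff > maxDiff then solutionLoop info rest ryanInfo' curDiff
      else if curDiff > 0 ∧ curDiff = maxDiff ∧ isBetter answer ryanInfo' then
        solutionLoop info rest ryanInfo' curDiff
      else solutionLoop info rest answer maxDiff
    else
      -- push win (if it scores) then push concede: concede ends on top of the stack
      if arrows > PySem.List.pyGetD info index 0 then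
        solutionLoop info
          ((index + 1, arrows, PySem.List.pySetD ryanInfo index 0) ::
            (index + 1, arrows - (PySem.List.pyGetD info index 0 + 1),
              PySem.List.pySetD ryanInfo index (PySem.List.pyGetD info index 0 + 1)) :: rest)
          answer maxDiff
      else
        solutionLoop info
          ((index + 1, arrows, PySem.List.pySetD ryanInfo index 0) :: rest) answer maxDiff
termination_by (stack.map loopMeasure).sum
decreasing_by
  · simp only [List.map_cons, List.sum_cons]
    have := loopMeasure_pos (index, arrows, ryanInfo)
    omega
  · simp only [List.map_cons, List.sum_cons]
    have := loopMeasure_pos (index, arrows, ryanInfo)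
    omega
  · simp only [List.map_cons, List.sum_cons]
    have := loopMeasure_pos (index, arrows, ryanInfo)
    omega
  · simp only [List.map_cons, List.sum_cons]
    have := loopMeasure_children index (by simpa [INFO_LAST_INDEX] using h) arrows
      (arrows - (PySem.List.pyGetD info index 0 + 1)) arrows
      (PySem.List.pySetD ryanInfo index 0)
      (PySem.List.pySetD ryanInfo index (PySem.List.pyGetD info index 0 + 1)) ryanInfo
    omega
  · simp only [List.map_cons, List.sum_cons]
    have h1 := loopMeasure_children index (by simpa [INFO_LAST_INDEX] using h) arrows arrows
      arrows (PySem.List.pySetD ryanInfo index 0) (PySem.List.pySetD ryanInfo index 0) ryanInfo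
    omega

def solution (n : Int) (info : List Int) : List Int :=
  let answer : List Int := [-1]
  let arrows := n
  let index : Int := 0
  let ryanInfo : List Int := List.replicate 11 0
  let maxDiff : Int := 0
  let stack : List (Int × Int × List Int) :=
    if arrows > PySem.List.pyGetD info index 0 then
      [(index + 1, arrows - (PySem.List.pyGetD info index 0 + 1),
        PySem.List.pySetD ryanInfo index (PySem.List.pyGetD info index 0 + 1))]
    else []
  (solutionLoop info ((index + 1, arrows, ryanInfo) :: stack) answer maxDiff).1

-- ===== PORT B =====
-- Python's '>' on two int lists (Source B: ryan[::-1] > answer[::-1]; [::-1] is reverse,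
-- PySem.List.slice?_none_none_neg_one)
def listGt : List Int → List Int → Bool
  | [], _ => false
  | _ :: _, [] => true
  | x :: xs, y :: ys => if x > y then true else if x < y then false else listGt xs ys

-- Source B's score_diff comprehension
def scoreDiff (info ryan : List Int) : Int :=
  ((PySem.List.pyRange 0 11 1).map (fun i =>
    if PySem.List.pyGetD ryan i 0 > PySem.List.pyGetD info i 0 then 10 - i
    else if PySem.List.pyGetD info i 0 ≠ 0 ∨ PySem.List.pyGetD ryan i 0 ≠ 0 then -(10 - i)
    else 0)).sum

def solutionDfs (info : List Int) (index arrows : Int) (ryan : List Int)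
    (best : List Int × Int) : List Int × Int :=
  if h : index > 10 then
    let ryan' := if arrows > 0 then PySem.List.slice ryan none (some 10) ++ [arrows] else ryan
    let diff := scoreDiff info ryan'
    if diff > best.2 ∨ (0 < diff ∧ diff = best.2 ∧ listGt ryan'.reverse best.1.reverse) then
      (ryan', diff)
    else best
  else
    let best' := solutionDfs info (index + 1) arrows (ryan ++ [0]) best
    if arrows > PySem.List.pyGetD info index 0 then
      solutionDfs info (index + 1) (arrows - (PySem.List.pyGetD info index 0 + 1))
        (ryan ++ [PySem.List.pyGetD info index 0 + 1]) best'
    else best'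
termination_by (11 - index).toNat
decreasing_by all_goals omega

def solution_alt (n : Int) (info : List Int) : List Int :=
  (solutionDfs info 0 n [] ([-1], 0)).1

-- ===== PRECONDITION & SPEC =====
-- A indexes info at 0..10 (solution and calcScore), so Python A raises IndexError
-- exactly when len(info) < 11; Pre_ excludes precisely those inputs.
def Pre_solution (n : Int) (info : List Int) : Prop := 11 ≤ info.length
instance (n : Int) (info : List Int) : Decidable (Pre_solution n info) := by
  unfold Pre_solution; infer_instance

def pvWitness_solution : Int × List Int := (5, [0, 0, 0, 0, 0, 0, 0, 0, 0, 0, 0])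

def Spec_solution (n : Int) (info : List Int) (out : List Int) : Prop := out = solution_alt n info
instance (n : Int) (info : List Int) (out : List Int) : Decidable (Spec_solution n info out) := by unfold Spec_solution; infer_instance

-- ===== CLAIM (what is proved, stated in full; the proofs are below) =====
def Claim_equal_solution : Prop := ∀ (n : Int) (info : List Int), Dom_solution n info → Pre_solution n info → Spec_solution n info (solution n info)

-- ===== LEMMAS AND PROOFS =====

-- A's two-accumulator score loop measures the same gap as B's comprehension
theorem calcScore_foldl (info r : List Int) (is : List Int) (p : Int × Int) :
    (is.foldl (fun acc i =>
      if PySem.List.pyGetD info i 0 = PySem.List.pyGetD r i 0 ∧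
          PySem.List.pyGetD r i 0 = 0 then acc
      else if PySem.List.pyGetD info i 0 ≥ PySem.List.pyGetD r i 0 then
        (acc.1 + (10 - i), acc.2)
      else (acc.1, acc.2 + (10 - i))) p).2
    - (is.foldl (fun acc i =>
      if PySem.List.pyGetD info i 0 = PySem.List.pyGetD r i 0 ∧
          PySem.List.pyGetD r i 0 = 0 then acc
      else if PySem.List.pyGetD info i 0 ≥ PySem.List.pyGetD r i 0 then
        (acc.1 + (10 - i), acc.2)
      else (acc.1, acc.2 + (10 - i))) p).1
    = p.2 - p.1 + (is.map (fun i =>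
      if PySem.List.pyGetD r i 0 > PySem.List.pyGetD info i 0 then 10 - i
      else if PySem.List.pyGetD info i 0 ≠ 0 ∨ PySem.List.pyGetD r i 0 ≠ 0 then -(10 - i)
      else 0)).sum := by
  induction is generalizing p with
  | nil => simp
  | cons i is ih =>
    simp only [List.foldl_cons, List.map_cons, List.sum_cons]
    rw [ih]
    split_ifs with h1 h2 h3 h4 h5 h6 h7 <;> simp_all <;> omega

theorem score_eq (info r : List Int) :
    (calcScore info r).2 - (calcScore info r).1 = scoreDiff info r := by
  unfold calcScore scoreDiff
  simpa using calcScore_foldl info r (PySem.List.pyRange 0 11 1) (0, 0)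

-- ryanInfo[10] = arrows on a length-11 list is ryan[:10] + [arrows]
theorem set_last_eq (r : List Int) (v : Int) (hr : r.length = 11) :
    PySem.List.pySetD r 10 v = PySem.List.slice r none (some 10) ++ [v] := by
  rw [PySem.List.pySetD_of_nonneg r v (by omega), PySem.List.slice_to (xs := r) (by omega)]
  rw [List.set_eq_take_cons_drop v (by omega)]
  have hd : r.drop (Int.toNat 10 + 1) = [] := List.drop_eq_nil_of_le (by simp; omega)
  rw [hd]

-- A's downward index loop is reversed-list lexicographic comparison (length-11 lists)
theorem len11_destruct (l : List Int) (h : l.length = 11) :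
    ∃ a b c d e f g h' i j k, l = [a, b, c, d, e, f, g, h', i, j, k] := by
  rcases l with _|⟨x0,l⟩; · simp at h
  rcases l with _|⟨x1,l⟩; · simp at h
  rcases l with _|⟨x2,l⟩; · simp at h
  rcases l with _|⟨x3,l⟩; · simp at h
  rcases l with _|⟨x4,l⟩; · simp at h
  rcases l with _|⟨x5,l⟩; · simp at h
  rcases l with _|⟨x6,l⟩; · simp at h
  rcases l with _|⟨x7,l⟩; · simp at h
  rcases l with _|⟨x8,l⟩; · simp at h
  rcases l with _|⟨x9,l⟩; · simp at h
  rcases l with _|⟨x10,l⟩; · simp at h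
  rcases l with _|⟨x11,l⟩
  · exact ⟨x0,x1,x2,x3,x4,x5,x6,x7,x8,x9,x10,rfl⟩
  · simp at h

theorem isBetter_eq_listGt (p c : List Int) (hp : p.length = 11) (hc : c.length = 11) :
    isBetter p c = listGt c.reverse p.reverse := by
  have hrange : PySem.List.pyRange 10 (-1) (-1) = [10, 9, 8, 7, 6, 5, 4, 3, 2, 1, 0] := by
    decide
  obtain ⟨p0,p1,p2,p3,p4,p5,p6,p7,p8,p9,p10,rfl⟩ := len11_destruct p hp
  obtain ⟨c0,c1,c2,c3,c4,c5,c6,c7,c8,c9,c10,rfl⟩ := len11_destruct c hc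
  simp only [isBetter, hrange, isBetterGo, listGt, List.reverse_cons, List.reverse_nil,
    List.nil_append, List.cons_append]
  norm_num [isBetterGo, listGt, PySem.List.pyGetD_ofNat', PySem.List.pyGetD_zero_cons]

-- dfs either keeps best or returns a full length-11 score sheet
theorem solutionDfs_len (info : List Int) : ∀ (k : Nat) (index arrows : Int)
    (ryan : List Int) (best : List Int × Int), index + k = 11 → 0 ≤ index →
    ryan.length = index.toNat →
    solutionDfs info index arrows ryan best = best ∨
      (solutionDfs info index arrows ryan best).1.length = 11 := by
  intro k
  induction k with
  | zero =>
    intro index arrows ryan best hk h0 hl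
    have hi : index = 11 := by omega
    subst hi
    rw [solutionDfs, dif_pos (by omega : (11:Int) > 10)]
    simp only
    split
    · split
      · right
        simp [PySem.List.slice_to (xs := ryan) (by omega : (0:Int) ≤ 10)]
        omega
      · left; rfl
    · split
      · right; simpa using hl
      · left; rfl
  | succ k ih =>
    intro index arrows ryan best hk h0 hl
    rw [solutionDfs, dif_neg (by omega : ¬ index > 10)]
    simp only
    split
    · rcases ih (index + 1) arrows (ryan ++ [0]) best (by omega) (by omega)
        (by simp [hl]; omega) with h2 | h2
      · rw [h2]
        exact ih (index + 1) _ _ best (by omega) (by omega) (by simp [hl]; omega)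
      · rcases ih (index + 1) _ (ryan ++ [PySem.List.pyGetD info index 0 + 1])
          (solutionDfs info (index + 1) arrows (ryan ++ [0]) best) (by omega) (by omega)
          (by simp [hl]; omega) with h3 | h3
        · rw [h3]; right; exact h2
        · right; exact h3
    · exact ih (index + 1) arrows (ryan ++ [0]) best (by omega) (by omega)
        (by simp [hl]; omega)

-- the leaf of A's loop performs exactly B's leaf update
theorem leaf_eq (info r answer : List Int) (arrows maxDiff : Int)
    (hr : r.length = 11) (hinv : 0 < maxDiff → answer.length = 11) :
    (let r' := if arrows > 0 then PySem.List.pySetD r 10 arrows else r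
     let s := calcScore info r'
     let curDiff := s.2 - s.1
     if curDiff > maxDiff then (r', curDiff)
     else if curDiff > 0 ∧ curDiff = maxDiff ∧ isBetter answer r' then (r', curDiff)
     else (answer, maxDiff))
    = solutionDfs info 11 arrows r (answer, maxDiff) := by
  rw [solutionDfs, dif_pos (by omega : (11:Int) > 10)]
  have hr' : (if arrows > 0 then PySem.List.pySetD r 10 arrows else r)
      = (if arrows > 0 then PySem.List.slice r none (some 10) ++ [arrows] else r) := by
    split
    · exact set_last_eq r arrows hr
    · rfl
  simp only [hr']
  set r' := if arrows > 0 then PySem.List.slice r none (some 10) ++ [arrows] else r with hr'def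
  have hr'len : r'.length = 11 := by
    rw [hr'def]; split
    · rw [PySem.List.slice_to (xs := r) (by omega : (0:Int) ≤ 10)]
      simp [hr]
    · exact hr
  rw [score_eq]
  by_cases hgt : scoreDiff info r' > maxDiff
  · simp [hgt]
  · by_cases h2 : scoreDiff info r' > 0 ∧ scoreDiff info r' = maxDiff
    · have hans : answer.length = 11 := hinv (by omega)
      rw [isBetter_eq_listGt answer r' hans hr'len]
      by_cases h3 : listGt r'.reverse answer.reverse
      · simp [h2.2, h3]
      · simp [h2, h3]
    · have hnot : ¬ (scoreDiff info r' > maxDiff ∨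
          (0 < scoreDiff info r' ∧ scoreDiff info r' = maxDiff ∧
            listGt r'.reverse answer.reverse = true)) := by
        rintro (h | ⟨ha, hb, -⟩)
        · exact hgt h
        · exact h2 ⟨ha, hb⟩
      have hnot2 : ¬ (scoreDiff info r' > 0 ∧ scoreDiff info r' = maxDiff ∧
          isBetter answer r' = true) := by
        rintro ⟨ha, hb, -⟩
        exact h2 ⟨ha, hb⟩
      rw [if_neg hnot, if_neg hgt, if_neg hnot2]

-- popping one frame of A's stack runs B's dfs on that frame's subtree
theorem bridge (info : List Int) : ∀ (k : Nat) (i arrows : Int) (rB : List Int)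
    (stack : List (Int × Int × List Int)) (answer : List Int) (maxDiff : Int),
    i + k = 11 → 0 ≤ i → rB.length = i.toNat → (0 < maxDiff → answer.length = 11) →
    solutionLoop info ((i, arrows, rB ++ List.replicate k 0) :: stack) answer maxDiff
      = solutionLoop info stack (solutionDfs info i arrows rB (answer, maxDiff)).1
          (solutionDfs info i arrows rB (answer, maxDiff)).2 := by
  intro k
  induction k with
  | zero =>
    intro i arrows rB stack answer maxDiff hk h0 hl hinv
    have hi : i = 11 := by omega
    subst hi
    rw [solutionLoop, dif_pos (by norm_num [INFO_LAST_INDEX])]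
    simp only [List.replicate_zero, List.append_nil] at *
    rw [← leaf_eq info rB answer arrows maxDiff (by omega) hinv]
    simp only
    split_ifs <;> rfl
  | succ k ih =>
    intro i arrows rB stack answer maxDiff hk h0 hl hinv
    have hle : ¬ i > INFO_LAST_INDEX := by simp [INFO_LAST_INDEX]; omega
    rw [solutionLoop, dif_neg hle]
    have hset : ∀ v : Int, PySem.List.pySetD (rB ++ List.replicate (k + 1) 0) i v
        = (rB ++ [v]) ++ List.replicate k 0 := by
      intro v
      rw [PySem.List.pySetD_of_nonneg _ v h0, List.replicate_succ]
      rw [show i.toNat = rB.length from by omega]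
      simp
    rw [solutionDfs, dif_neg (by simpa [INFO_LAST_INDEX] using hle)]
    simp only
    have hb1 := solutionDfs_len info k (i + 1) arrows (rB ++ [0]) (answer, maxDiff)
      (by omega) (by omega) (by simp [hl]; omega)
    set b1 := solutionDfs info (i + 1) arrows (rB ++ [0]) (answer, maxDiff) with hb1def
    have hinv1 : 0 < b1.2 → b1.1.length = 11 := by
      rcases hb1 with h | h
      · rw [h]; exact hinv
      · exact fun _ => h
    split
    · rw [hset, hset]
      rw [ih (i + 1) arrows (rB ++ [0])
        ((i + 1, arrows - (PySem.List.pyGetD info i 0 + 1),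
          rB ++ [PySem.List.pyGetD info i 0 + 1] ++ List.replicate k 0) :: stack)
        answer maxDiff (by omega) (by omega) (by simp [hl]; omega) hinv]
      rw [← hb1def]
      rw [ih (i + 1) (arrows - (PySem.List.pyGetD info i 0 + 1))
        (rB ++ [PySem.List.pyGetD info i 0 + 1]) stack b1.1 b1.2 (by omega) (by omega)
        (by simp [hl]; omega) hinv1]
    · rw [hset]
      rw [ih (i + 1) arrows (rB ++ [0]) stack answer maxDiff (by omega) (by omega)
        (by simp [hl]; omega) hinv]

-- ===== VERDICT (by name: the statement is the Claim_ definition above) =====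
theorem solution_spec : Claim_equal_solution := by
  intro n info _ hpre
  unfold Spec_solution solution solution_alt
  simp only
  have hrep : (List.replicate 11 (0:Int)) = [0] ++ List.replicate 10 0 := by decide
  rw [solutionDfs, dif_neg (by omega : ¬ (0:Int) > 10)]
  simp only [List.nil_append]
  have hb1 := solutionDfs_len info 10 (0 + 1) n [0] (([-1], 0) : List Int × Int)
    (by omega) (by omega) (by simp)
  set b1 := solutionDfs info (0 + 1) n [0] (([-1], 0) : List Int × Int) with hb1def
  have hinv1 : 0 < b1.2 → b1.1.length = 11 := by
    rcases hb1 with h | h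
    · rw [h]; intro h0; simp at h0
    · exact fun _ => h
  split
  · -- initial win push exists; stack = concede :: win :: []
    rw [hrep]
    rw [bridge info 10 (0 + 1) n [0] _ [-1] 0 (by omega) (by omega) (by simp) (by omega)]
    rw [← hb1def]
    have hset0 : PySem.List.pySetD ([0] ++ List.replicate 10 (0:Int)) 0
        (PySem.List.pyGetD info 0 0 + 1)
        = [PySem.List.pyGetD info 0 0 + 1] ++ List.replicate 10 0 := by
      rw [PySem.List.pySetD_of_nonneg _ _ (by omega : (0:Int) ≤ 0)]
      simp
    rw [hset0]
    rw [bridge info 10 (0 + 1) (n - (PySem.List.pyGetD info 0 0 + 1))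
      [PySem.List.pyGetD info 0 0 + 1] [] b1.1 b1.2 (by omega) (by omega) (by simp) hinv1]
    rw [solutionLoop]
  · rw [hrep]
    rw [bridge info 10 (0 + 1) n [0] [] [-1] 0 (by omega) (by omega) (by simp) (by omega)]
    rw [← hb1def, solutionLoop]
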